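-- pv_equiv track=rewrite | github.com/jamie-stephenson/jet | utils/tokenizer/tokenizer.py | _unmerge_byte
-- ===== SOURCE A (Python) =====
-- from typing import Tuple, List
--
-- def _unmerge_byte(lst: List[int], merged_byte: int, bytepair: Tuple[int,int]) -> List[int]:
--     new_lst = []
--     for i in range(len(lst)):
--         if lst[i] == merged_byte:
--             new_lst += list(bytepair)
--         else:
--             new_lst.append(lst[i])
--     return new_lst
-- ===== SOURCE B (Python) =====
-- from typing import Tuple, List
--
-- def _unmerge_byte(lst: List[int], merged_byte: int, bytepair: Tuple[int,int]) -> List[int]: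
--     # Segment-based reconstruction: collect the cut positions once, then copy
--     # the untouched runs between them and splice in the bytepair at each cut.
--     cuts = [i for i, x in enumerate(lst) if x == merged_byte]
--     out = []
--     prev = 0
--     for i in cuts:
--         out += lst[prev:i]
--         out += list(bytepair)
--         prev = i + 1
--     out += lst[prev:]
--     return out
-- ===== Notes on version B (the rewrite author's own statement) =====
-- stated objective: alternative
-- what changed: B first collects the cut positions (indices equal to merged_byte) in one pass, then reconstructs the output by copying the untouched slices between consecutive cuts and splicing in the bytepair at each cut, instead of branching on every element while appending.
import Mathlib
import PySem

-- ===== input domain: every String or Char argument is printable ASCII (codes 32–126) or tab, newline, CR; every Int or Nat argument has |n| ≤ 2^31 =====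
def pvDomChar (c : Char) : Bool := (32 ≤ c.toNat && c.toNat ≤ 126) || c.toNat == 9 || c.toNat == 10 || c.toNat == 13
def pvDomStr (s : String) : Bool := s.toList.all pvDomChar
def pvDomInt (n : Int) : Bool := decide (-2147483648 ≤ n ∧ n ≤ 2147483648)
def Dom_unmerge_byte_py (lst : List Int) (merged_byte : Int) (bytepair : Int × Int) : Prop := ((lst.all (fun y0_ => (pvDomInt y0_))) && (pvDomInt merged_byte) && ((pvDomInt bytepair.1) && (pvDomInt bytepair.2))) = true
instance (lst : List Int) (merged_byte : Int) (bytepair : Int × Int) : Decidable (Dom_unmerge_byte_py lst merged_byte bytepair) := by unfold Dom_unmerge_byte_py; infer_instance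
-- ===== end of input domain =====

-- B rebuilds the list from the cut positions of merged_byte, copying the untouched
-- runs between cuts by slicing instead of branching on every element (alternative decomposition).

-- ===== PORT A =====
-- for i in range(len(lst)): if lst[i] == merged_byte: new_lst += list(bytepair) else new_lst.append(lst[i])
def unmerge_byte_py (lst : List Int) (merged_byte : Int) (bytepair : Int × Int) : List Int :=
  (PySem.List.pyRange 0 (lst.length : Int) 1).foldl
    (fun new_lst i =>
      if PySem.List.pyGetD lst i 0 = merged_byte then new_lst ++ [bytepair.1, bytepair.2]
      else new_lst ++ [PySem.List.pyGetD lst i 0]) []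

-- ===== PORT B =====
-- one fold step of Source B's loop over the cut positions: out += lst[prev:i]; out += list(bytepair); prev = i + 1
def pvCutStep (lst : List Int) (bytepair : Int × Int) (s : List Int × Int) (i : Int) : List Int × Int :=
  (s.1 ++ PySem.List.slice lst (some s.2) (some i) ++ [bytepair.1, bytepair.2], i + 1)

def unmerge_byte_py_alt (lst : List Int) (merged_byte : Int) (bytepair : Int × Int) : List Int :=
  let cuts := ((PySem.List.enumerate lst).filter (fun p => p.2 == merged_byte)).map (·.1)
  let s := cuts.foldl (pvCutStep lst bytepair) ([], 0)
  s.1 ++ PySem.List.slice lst (some s.2) none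

-- ===== PRECONDITION & SPEC =====
def Spec_unmerge_byte_py (lst : List Int) (merged_byte : Int) (bytepair : Int × Int) (out : List Int) : Prop := out = unmerge_byte_py_alt lst merged_byte bytepair
instance (lst : List Int) (merged_byte : Int) (bytepair : Int × Int) (out : List Int) : Decidable (Spec_unmerge_byte_py lst merged_byte bytepair out) := by unfold Spec_unmerge_byte_py; infer_instance

-- ===== CLAIM (what is proved, stated in full; the proofs are below) =====
def Claim_equal_unmerge_byte_py : Prop := ∀ (lst : List Int) (merged_byte : Int) (bytepair : Int × Int), Dom_unmerge_byte_py lst merged_byte bytepair → Spec_unmerge_byte_py lst merged_byte bytepair (unmerge_byte_py lst merged_byte bytepair)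

-- ===== LEMMAS AND PROOFS =====

-- the common characterization: expand each merged_byte to the pair, keep the rest
def pvExpand (merged_byte : Int) (bytepair : Int × Int) (x : Int) : List Int :=
  if x = merged_byte then [bytepair.1, bytepair.2] else [x]

lemma foldl_expand (m : Int) (bp : Int × Int) :
    ∀ (l : List Int) (acc : List Int),
    l.foldl (fun acc x => if x = m then acc ++ [bp.1, bp.2] else acc ++ [x]) acc
      = acc ++ l.flatMap (pvExpand m bp) := by
  intro l
  induction l with
  | nil => simp
  | cons x xs ih =>
    intro acc
    simp only [List.foldl_cons, List.flatMap_cons, ih, pvExpand]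
    split_ifs <;> simp

lemma A_eq_flatMap (lst : List Int) (m : Int) (bp : Int × Int) :
    unmerge_byte_py lst m bp = lst.flatMap (pvExpand m bp) := by
  unfold unmerge_byte_py
  rw [PySem.List.foldl_pyRange_zero_pyGetD' lst 0
      (fun new_lst x => if x = m then new_lst ++ [bp.1, bp.2] else new_lst ++ [x]) []]
  simpa using foldl_expand m bp lst []

-- every cut index produced from enumerate (start s) is ≥ s
lemma cuts_ge (lst : List Int) (m : Int) (s : Int) :
    ∀ i ∈ (((PySem.List.enumerate lst s).filter (fun p => p.2 == m)).map (·.1)), s ≤ i := by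
  intro i hi
  simp only [List.mem_map, List.mem_filter] at hi
  obtain ⟨p, ⟨hp, _⟩, rfl⟩ := hi
  rw [PySem.List.mem_enumerate_iff] at hp
  obtain ⟨k, hk, rfl⟩ := hp
  simp

-- consuming a non-cut element: moving prev past lst[k] changes nothing once the trailing slice is added
lemma bump (lst : List Int) (bp : Int × Int) (k : Nat) (hk : k < lst.length)
    (cs : List Int) (hcs : ∀ i ∈ cs, ((k : Int) + 1) ≤ i) (acc : List Int) :
    (cs.foldl (pvCutStep lst bp) (acc, (k : Int))).1 ++
      PySem.List.slice lst (some (cs.foldl (pvCutStep lst bp) (acc, (k : Int))).2) none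
    = (cs.foldl (pvCutStep lst bp) (acc ++ [lst[k]], ((k : Int) + 1))).1 ++
      PySem.List.slice lst (some (cs.foldl (pvCutStep lst bp) (acc ++ [lst[k]], ((k : Int) + 1))).2) none := by
  cases cs with
  | nil =>
    simp only [List.foldl_nil]
    have h1 : ((k : Int) + 1) = ((k + 1 : Nat) : Int) := by push_cast; ring
    rw [h1, PySem.List.slice_from_natCast, PySem.List.slice_from_natCast,
        List.drop_eq_getElem_cons hk]
    simp
  | cons i cs' =>
    have hi := hcs i (List.mem_cons_self ..)
    simp only [List.foldl_cons]
    have hstep : pvCutStep lst bp (acc, (k : Int)) i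
        = pvCutStep lst bp (acc ++ [lst[k]], ((k : Int) + 1)) i := by
      unfold pvCutStep
      have h0 : (0 : Int) ≤ (k : Int) := by positivity
      have h1 : (0 : Int) ≤ (k : Int) + 1 := by positivity
      have h2 : (0 : Int) ≤ i := by omega
      rw [PySem.List.slice_toNat _ h0 h2, PySem.List.slice_toNat _ h1 h2]
      have hkn : ((k : Int) + 1).toNat = k + 1 := by omega
      have hik : k < i.toNat := by omega
      rw [hkn]
      simp only [Int.toNat_natCast]
      rw [List.drop_eq_getElem_cons hk]
      have : i.toNat - k = (i.toNat - (k + 1)) + 1 := by omega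
      rw [this, List.take_succ_cons]
      simp
    rw [hstep]

-- main invariant of Source B's loop, by downward induction on the suffix of lst
lemma B_invariant (lst : List Int) (m : Int) (bp : Int × Int) :
    ∀ (n k : Nat) (acc : List Int), k ≤ lst.length → lst.length - k = n →
    (((((PySem.List.enumerate (lst.drop k) (k : Int)).filter (fun p => p.2 == m)).map (·.1)).foldl
        (pvCutStep lst bp) (acc, (k : Int))).1 ++
      PySem.List.slice lst
        (some (((((PySem.List.enumerate (lst.drop k) (k : Int)).filter (fun p => p.2 == m)).map (·.1)).foldl
        (pvCutStep lst bp) (acc, (k : Int))).2)) none)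
    = acc ++ (lst.drop k).flatMap (pvExpand m bp) := by
  intro n
  induction n with
  | zero =>
    intro k acc hk hn
    have : lst.drop k = [] := by
      apply List.drop_eq_nil_of_le; omega
    rw [this]
    simp only [PySem.List.enumerate_nil, List.filter_nil, List.map_nil, List.foldl_nil,
      List.flatMap_nil, List.append_nil]
    rw [PySem.List.slice_from_natCast]
    rw [List.drop_eq_nil_of_le (by omega)]
    simp
  | succ n ih =>
    intro k acc hk hn
    have hklt : k < lst.length := by omega
    rw [List.drop_eq_getElem_cons hklt]
    rw [PySem.List.enumerate_cons]
    by_cases hx : lst[k] = m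
    · -- cut at k: prepend the pair, prev becomes k+1
      simp only [List.filter_cons, hx, beq_self_eq_true, if_true, List.map_cons, List.foldl_cons]
      have hstep : pvCutStep lst bp (acc, (k : Int)) (k : Int) = (acc ++ [bp.1, bp.2], (k : Int) + 1) := by
        unfold pvCutStep
        rw [PySem.List.slice_toNat _ (by positivity) (by positivity)]
        simp
      rw [hstep]
      have h1 : ((k : Int) + 1) = ((k + 1 : Nat) : Int) := by push_cast; ring
      rw [h1]
      have := ih (k + 1) (acc ++ [bp.1, bp.2]) (by omega) (by omega)
      rw [this]
      simp [pvExpand]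
    · -- no cut at k: skip it, fold prev past lst[k] via bump
      simp only [List.filter_cons]
      have hxb : ((lst[k] : Int) == m) = false := by simp [hx]
      simp only [hxb, if_false, Bool.false_eq_true]
      rw [bump lst bp k hklt _ (fun i hi => cuts_ge (lst.drop (k+1)) m ((k : Int) + 1) i hi) acc]
      have h1 : ((k : Int) + 1) = ((k + 1 : Nat) : Int) := by push_cast; ring
      rw [h1]
      have := ih (k + 1) (acc ++ [lst[k]]) (by omega) (by omega)
      rw [this, List.flatMap_cons]
      simp only [pvExpand, if_neg hx, List.append_assoc]

lemma B_eq_flatMap (lst : List Int) (m : Int) (bp : Int × Int) :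
    unmerge_byte_py_alt lst m bp = lst.flatMap (pvExpand m bp) := by
  unfold unmerge_byte_py_alt
  have := B_invariant lst m bp lst.length 0 [] (by omega) (by omega)
  simpa using this

-- ===== VERDICT (by name: the statement is the Claim_ definition above) =====
theorem unmerge_byte_py_spec : Claim_equal_unmerge_byte_py := by
  intro lst m bp _
  unfold Spec_unmerge_byte_py
  rw [A_eq_flatMap, B_eq_flatMap]
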